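-- pv_equiv track=rewrite | github.com/christopherLang/STA9792-Natural-Language-Processing | Homework and Project/Homework 2/homework2 - STA9792 - Christopher Lang.py | ngram
-- ===== SOURCE A (Python) =====
-- def ngram(list_of_tokens, n=1):
--     r = list()
--     ind_ngram = list()
--     n_i = 0
--
--     for i in range(len(list_of_tokens)):
--         ind_ngram.append(list_of_tokens[i])
--         n_i += 1
--         if n_i == n:
--             r.append(ind_ngram)
--             ind_ngram = list()
--             n_i = 0
--
--     r = [tuple(i) for i in r]
--
--     return r
-- ===== SOURCE B (Python) =====
-- def ngram(list_of_tokens, n=1):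
--     if n <= 0 or n > len(list_of_tokens):
--         return []
--     return list(zip(*[iter(list_of_tokens)] * n))
-- ===== Notes on version B (the rewrite author's own statement) =====
-- stated objective: idiomatic
-- what changed: Replaces the manual accumulator loop (index loop, counter, flush-on-full, tuple conversion pass) with the standard shared-iterator grouper idiom zip(*[iter(xs)]*n), which forms the n-tuples directly in one expression.
import Mathlib
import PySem

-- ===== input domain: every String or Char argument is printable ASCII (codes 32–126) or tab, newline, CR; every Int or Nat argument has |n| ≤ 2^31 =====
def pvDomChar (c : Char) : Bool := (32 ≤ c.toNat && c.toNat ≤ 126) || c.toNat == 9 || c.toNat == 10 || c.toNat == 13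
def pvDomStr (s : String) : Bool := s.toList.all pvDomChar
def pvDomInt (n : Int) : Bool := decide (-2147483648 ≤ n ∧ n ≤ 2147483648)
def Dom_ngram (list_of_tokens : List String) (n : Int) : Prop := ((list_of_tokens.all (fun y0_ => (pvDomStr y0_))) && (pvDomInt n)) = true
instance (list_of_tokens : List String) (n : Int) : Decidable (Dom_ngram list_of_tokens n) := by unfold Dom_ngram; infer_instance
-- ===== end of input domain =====

-- B replaces A's manual index loop + counter + flush-on-full with the shared-iterator
-- grouper idiom zip(*[iter(xs)]*n); same return value (equivalence is about the return value).

-- ===== PORT A =====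

-- A's loop body: append token to the partial group, bump the counter, flush when it hits n
def ngramStep (n : Int) (st : List (List String) × List String × Int) (x : String) :
    List (List String) × List String × Int :=
  let ind := st.2.1 ++ [x]
  let ni := st.2.2 + 1
  if ni = n then (st.1 ++ [ind], [], 0) else (st.1, ind, ni)

def ngram (list_of_tokens : List String) (n : Int) : List (List String) :=
  let st := (PySem.List.pyRange 0 (list_of_tokens.length : Int) 1).foldl
    (fun st i => ngramStep n st (PySem.List.pyGetD list_of_tokens i ""))
    ([], [], 0)
  st.1

-- ===== PORT B =====
-- the grouper idiom: each zip step consumes n consecutive tokens; the incomplete tail falls off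
def ngramChunks (xs : List String) (m : Nat) : List (List String) :=
  if _h : 0 < m ∧ m ≤ xs.length then
    xs.take m :: ngramChunks (xs.drop m) m
  else []
termination_by xs.length
decreasing_by simp; omega

def ngram_alt (list_of_tokens : List String) (n : Int) : List (List String) :=
  if n ≤ 0 ∨ (list_of_tokens.length : Int) < n then []
  else ngramChunks list_of_tokens n.toNat

-- ===== PRECONDITION & SPEC =====
def Spec_ngram (list_of_tokens : List String) (n : Int) (out : List (List String)) : Prop := out = ngram_alt list_of_tokens n
instance (list_of_tokens : List String) (n : Int) (out : List (List String)) : Decidable (Spec_ngram list_of_tokens n out) := by unfold Spec_ngram; infer_instance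

-- ===== CLAIM (what is proved, stated in full; the proofs are below) =====
def Claim_equal_ngram : Prop := ∀ (list_of_tokens : List String) (n : Int), Dom_ngram list_of_tokens n → Spec_ngram list_of_tokens n (ngram list_of_tokens n)

-- ===== LEMMAS AND PROOFS =====

-- when n ≤ 0 the counter never reaches n (it stays ≥ 0), so nothing is ever flushed
theorem ngram_loop_nonpos (n : Int) (hn : n ≤ 0) :
    ∀ (xs : List String) (r : List (List String)) (pre : List String) (ni : Int), 0 ≤ ni →
    (xs.foldl (ngramStep n)
      (r, pre, ni)).1 = r := by
  intro xs
  induction xs with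
  | nil => intro r pre ni _; rfl
  | cons x xs ih =>
    intro r pre ni hni
    simp only [List.foldl_cons]
    rw [show ngramStep n (r, pre, ni) x = (r, pre ++ [x], ni + 1) from by
      simp only [ngramStep]; rw [if_neg (by omega)]]
    exact ih r (pre ++ [x]) (ni + 1) (by omega)

-- main invariant: with partial group pre (|pre| < n) the loop emits exactly the
-- complete n-chunks of pre ++ xs
theorem ngram_loop_pos (n : Int) (hn : 0 < n) :
    ∀ (xs : List String) (r : List (List String)) (pre : List String),
    pre.length < n.toNat →
    (xs.foldl (ngramStep n)
      (r, pre, (pre.length : Int))).1 = r ++ ngramChunks (pre ++ xs) n.toNat := by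
  intro xs
  induction xs with
  | nil =>
    intro r pre hpre
    rw [ngramChunks, dif_neg (by simp; omega)]
    simp
  | cons x xs ih =>
    intro r pre hpre
    simp only [List.foldl_cons]
    by_cases hfull : (pre.length : Int) + 1 = n
    · rw [show ngramStep n (r, pre, (pre.length : Int)) x
          = (r ++ [pre ++ [x]], [], (([] : List String).length : Int)) from by
        simp only [ngramStep]; rw [if_pos hfull]; simp]
      have hm : n.toNat = pre.length + 1 := by omega
      rw [ih (r ++ [pre ++ [x]]) [] (by simp [hm])]
      have hR : ngramChunks (pre ++ x :: xs) n.toNat = (pre ++ [x]) :: ngramChunks xs n.toNat := by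
        conv_lhs => rw [ngramChunks]
        rw [dif_pos ⟨by omega, by simp only [hm, List.length_append, List.length_cons]; omega⟩]
        have hsplit : pre ++ x :: xs = (pre ++ [x]) ++ xs := by simp
        rw [hsplit, List.take_left' (by simp [hm]), List.drop_left' (by simp [hm])]
      rw [hR]
      simp
    · rw [show ngramStep n (r, pre, (pre.length : Int)) x
          = (r, pre ++ [x], ((pre ++ [x]).length : Int)) from by
        simp only [ngramStep]; rw [if_neg hfull]; simp]
      have hlt : (pre ++ [x]).length < n.toNat := by
        simp; omega
      rw [ih r (pre ++ [x]) hlt]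
      simp

-- ===== VERDICT (by name: the statement is the Claim_ definition above) =====
theorem ngram_spec : Claim_equal_ngram := by
  intro xs n _
  unfold Spec_ngram ngram ngram_alt
  show ((PySem.List.pyRange 0 (xs.length : Int) 1).foldl
      (fun st i => ngramStep n st (PySem.List.pyGetD xs i "")) ([], [], 0)).1 = _
  rw [PySem.List.foldl_pyRange_zero_pyGetD' xs "" (ngramStep n) ([], [], 0)]
  by_cases hn : n ≤ 0
  · rw [if_pos (Or.inl hn)]
    exact ngram_loop_nonpos n hn xs [] [] 0 le_rfl
  · have hpos : 0 < n.toNat := by omega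
    have h := ngram_loop_pos n (by omega) xs [] [] (by simpa using hpos)
    simp only [List.nil_append, List.length_nil, Int.natCast_zero] at h
    by_cases hl : (xs.length : Int) < n
    · rw [if_pos (Or.inr hl), h, ngramChunks, dif_neg (by intro hc; omega)]
    · rw [if_neg (by intro hc; rcases hc with hc | hc <;> omega), h]
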